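-- pv_equiv track=rewrite | github.com/ajweeks/Advent-of-Code | 2019/day03.py | dist_to_point
-- ===== SOURCE A (Python) =====
-- def is_horiz(seg):
--     return seg[0][0] != seg[1][0]
--
-- def additional_steps(p_seg, n_seg, crossing):
--     if is_horiz(n_seg):
--         if n_seg[0] == p_seg[0] or n_seg[0] == p_seg[1]:
--             # Going right
--             dist = n_seg[1][0] - crossing[0]
--             return dist
--         elif n_seg[1] == p_seg[0] or n_seg[1] == p_seg[1]:
--             # Going left
--             dist = crossing[0] - n_seg[0][0]
--             return dist
--         else:
--             assert False
--     else:
--         if n_seg[0] == p_seg[0] or n_seg[0] == p_seg[1]: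
--             # Going up
--             dist = n_seg[1][1] - crossing[1]
--             return dist
--         elif n_seg[1] == p_seg[0] or n_seg[1] == p_seg[1]:
--             # Going down
--             dist = crossing[1] - n_seg[0][1]
--             return dist
--         else:
--             assert False
--
-- def dist_to_point(segs, point):
--     dist = 0
--     for seg_i in range(len(segs)):
--         seg = segs[seg_i][0]
--         dist += seg[1][0] - seg[0][0] + seg[1][1] - seg[0][1]
--
--         if point[0] == seg[0][0] and point[0] == seg[1][0]:
--             if seg[0][1] <= point[1] <= seg[1][1]:
--                 dist -= additional_steps(((0,0),(0,0)) if seg_i == 0 else segs[seg_i-1][0], segs[seg_i][0], point)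
--                 return dist
--         elif point[1] == seg[0][1] and point[1] == seg[1][1]:
--             if seg[0][0] <= point[0] <= seg[1][0]:
--                 dist -= additional_steps(((0,0),(0,0)) if seg_i == 0 else segs[seg_i-1][0], segs[seg_i][0], point)
--                 return dist
--     return -1
-- ===== SOURCE B (Python) =====
-- def dist_to_point(segs, point):
--     px, py = point
--
--     def contains(seg):
--         (x0, y0), (x1, y1) = seg
--         if px == x0 and px == x1:
--             return y0 <= py <= y1
--         return py == y0 and py == y1 and x0 <= px <= x1
--
--     # stage 1: locate the first segment containing the point
--     idx = next((i for i, (seg, _) in enumerate(segs) if contains(seg)), None)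
--     if idx is None:
--         return -1
--     # stage 2: signed step total of the strict prefix, as a slice sum
--     steps = sum(x1 - x0 + y1 - y0 for ((x0, y0), (x1, y1)), _ in segs[:idx])
--     # stage 3: Manhattan distance from the entry endpoint of the hit segment
--     seg = segs[idx][0]
--     prev = ((0, 0), (0, 0)) if idx == 0 else segs[idx - 1][0]
--     entry = seg[0] if seg[0] in prev else seg[1]
--     return steps + abs(px - entry[0]) + abs(py - entry[1])
-- ===== Notes on version B (the rewrite author's own statement) =====
-- stated objective: simpler
-- what changed: B replaces A's single accumulate-then-subtract loop (with the four-branch directional helper additional_steps) by three staged passes: locate the index of the first segment containing the point, sum the signed lengths of the strict prefix slice, and add the Manhattan distance from the entry endpoint.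
import Mathlib
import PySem

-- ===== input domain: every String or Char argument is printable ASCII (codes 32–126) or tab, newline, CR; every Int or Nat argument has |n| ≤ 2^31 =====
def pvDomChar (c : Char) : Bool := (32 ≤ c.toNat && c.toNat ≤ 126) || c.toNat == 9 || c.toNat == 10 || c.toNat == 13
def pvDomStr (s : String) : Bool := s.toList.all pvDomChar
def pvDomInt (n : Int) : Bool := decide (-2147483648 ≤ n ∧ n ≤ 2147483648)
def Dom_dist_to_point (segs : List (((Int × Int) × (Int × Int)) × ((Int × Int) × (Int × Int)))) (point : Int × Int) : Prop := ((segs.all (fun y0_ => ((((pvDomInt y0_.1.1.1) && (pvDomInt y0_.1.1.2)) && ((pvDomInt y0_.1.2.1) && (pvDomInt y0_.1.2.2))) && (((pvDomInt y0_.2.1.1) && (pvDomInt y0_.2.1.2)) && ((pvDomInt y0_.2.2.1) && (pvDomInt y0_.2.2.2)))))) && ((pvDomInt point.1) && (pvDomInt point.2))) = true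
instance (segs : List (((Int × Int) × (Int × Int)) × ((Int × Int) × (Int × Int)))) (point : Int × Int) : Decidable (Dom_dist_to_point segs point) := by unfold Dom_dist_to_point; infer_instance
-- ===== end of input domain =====

-- B replaces A's accumulate-then-subtract loop (with the directional helper
-- additional_steps) by three staged passes: locate the first containing segment,
-- sum the signed lengths of the strict prefix slice, add the Manhattan distance
-- from the entry endpoint (simpler).

-- ===== PORT A =====
def is_horiz (seg : (Int × Int) × (Int × Int)) : Bool := seg.1.1 != seg.2.1

def additional_steps (p_seg n_seg : (Int × Int) × (Int × Int)) (crossing : Int × Int) : Int :=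
  if is_horiz n_seg then
    if n_seg.1 == p_seg.1 || n_seg.1 == p_seg.2 then
      n_seg.2.1 - crossing.1
    else if n_seg.2 == p_seg.1 || n_seg.2 == p_seg.2 then
      crossing.1 - n_seg.1.1
    else 0  -- Python: `assert False` raises AssertionError here; excluded by Pre_
  else
    if n_seg.1 == p_seg.1 || n_seg.1 == p_seg.2 then
      n_seg.2.2 - crossing.2
    else if n_seg.2 == p_seg.1 || n_seg.2 == p_seg.2 then
      crossing.2 - n_seg.1.2
    else 0  -- Python: `assert False` raises AssertionError here; excluded by Pre_

def distA_go (segs : List (((Int × Int) × (Int × Int)) × ((Int × Int) × (Int × Int))))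
    (point : Int × Int) (i : Nat) (dist : Int) : Int :=
  if h : i < segs.length then
    let seg := (segs.getD i default).1
    let dist1 := dist + (seg.2.1 - seg.1.1 + seg.2.2 - seg.1.2)
    let prev := if i == 0 then (((0:Int),(0:Int)),((0:Int),(0:Int))) else (segs.getD (i-1) default).1
    if point.1 == seg.1.1 && point.1 == seg.2.1 then
      if seg.1.2 ≤ point.2 ∧ point.2 ≤ seg.2.2 then dist1 - additional_steps prev seg point
      else distA_go segs point (i+1) dist1
    else if point.2 == seg.1.2 && point.2 == seg.2.2 then
      if seg.1.1 ≤ point.1 ∧ point.1 ≤ seg.2.1 then dist1 - additional_steps prev seg point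
      else distA_go segs point (i+1) dist1
    else distA_go segs point (i+1) dist1
  else -1
termination_by segs.length - i

def dist_to_point (segs : List (((Int × Int) × (Int × Int)) × ((Int × Int) × (Int × Int)))) (point : Int × Int) : Int :=
  distA_go segs point 0 0

-- ===== PORT B =====
def bContains (point : Int × Int) (seg : (Int × Int) × (Int × Int)) : Bool :=
  if point.1 == seg.1.1 && point.1 == seg.2.1 then
    decide (seg.1.2 ≤ point.2 ∧ point.2 ≤ seg.2.2)
  else
    point.2 == seg.1.2 && point.2 == seg.2.2 && decide (seg.1.1 ≤ point.1 ∧ point.1 ≤ seg.2.1)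

-- port of Source B's `next((i for i, (seg, _) in enumerate(segs) if contains(seg)), None)`
def bFindIdx (point : Int × Int) :
    List (((Int × Int) × (Int × Int)) × ((Int × Int) × (Int × Int))) → Nat → Option Nat
  | [], _ => none
  | (seg, _) :: rest, i => if bContains point seg then some i else bFindIdx point rest (i+1)

def dist_to_point_alt (segs : List (((Int × Int) × (Int × Int)) × ((Int × Int) × (Int × Int)))) (point : Int × Int) : Int :=
  match bFindIdx point segs 0 with
  | none => -1
  | some idx =>
    let steps := ((segs.take idx).map (fun s => s.1.2.1 - s.1.1.1 + s.1.2.2 - s.1.1.2)).sum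
    let seg := (segs.getD idx default).1
    let prev := if idx == 0 then (((0:Int),(0:Int)),((0:Int),(0:Int))) else (segs.getD (idx-1) default).1
    let entry := if seg.1 == prev.1 || seg.1 == prev.2 then seg.1 else seg.2
    steps + |point.1 - entry.1| + |point.2 - entry.2|

-- ===== PRECONDITION & SPEC =====
-- helpers for Pre_ only (not used by either port)
def pvHit (point : Int × Int) (seg : (Int × Int) × (Int × Int)) : Bool :=
  if point.1 == seg.1.1 && point.1 == seg.2.1 then
    decide (seg.1.2 ≤ point.2 ∧ point.2 ≤ seg.2.2)
  else
    point.2 == seg.1.2 && point.2 == seg.2.2 && decide (seg.1.1 ≤ point.1 ∧ point.1 ≤ seg.2.1)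

def pvAdj (prev seg : (Int × Int) × (Int × Int)) : Bool :=
  seg.1 == prev.1 || seg.1 == prev.2 || seg.2 == prev.1 || seg.2 == prev.2

def pvPrevOf (segs : List (((Int × Int) × (Int × Int)) × ((Int × Int) × (Int × Int)))) (i : Nat) : (Int × Int) × (Int × Int) :=
  if i = 0 then (((0:Int),(0:Int)),((0:Int),(0:Int))) else (segs.getD (i-1) default).1

-- Pre_ excludes exactly the inputs on which A raises AssertionError: those whose FIRST
-- segment containing the point shares no endpoint with the previous segment
-- (with ((0,0),(0,0)) as segment -1); A returns normally on every other input.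
def Pre_dist_to_point (segs : List (((Int × Int) × (Int × Int)) × ((Int × Int) × (Int × Int)))) (point : Int × Int) : Prop :=
  ∀ i, i < segs.length → (∀ j, j < i → pvHit point ((segs.getD j default).1) = false) →
    pvHit point ((segs.getD i default).1) = true →
    pvAdj (pvPrevOf segs i) ((segs.getD i default).1) = true
instance (segs : List (((Int × Int) × (Int × Int)) × ((Int × Int) × (Int × Int)))) (point : Int × Int) : Decidable (Pre_dist_to_point segs point) := by unfold Pre_dist_to_point; infer_instance

def pvWitness_dist_to_point : (List (((Int × Int) × (Int × Int)) × ((Int × Int) × (Int × Int)))) × (Int × Int) :=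
  ([(((0,0),(0,3)), ((0,0),(0,0))), (((0,3),(4,3)), ((0,0),(0,0)))], (0,2))

def Spec_dist_to_point (segs : List (((Int × Int) × (Int × Int)) × ((Int × Int) × (Int × Int)))) (point : Int × Int) (out : Int) : Prop := out = dist_to_point_alt segs point
instance (segs : List (((Int × Int) × (Int × Int)) × ((Int × Int) × (Int × Int)))) (point : Int × Int) (out : Int) : Decidable (Spec_dist_to_point segs point out) := by unfold Spec_dist_to_point; infer_instance

-- ===== CLAIM (what is proved, stated in full; the proofs are below) =====
def Claim_equal_dist_to_point : Prop := ∀ (segs : List (((Int × Int) × (Int × Int)) × ((Int × Int) × (Int × Int)))) (point : Int × Int), Dom_dist_to_point segs point → Pre_dist_to_point segs point → Spec_dist_to_point segs point (dist_to_point segs point)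

-- ===== LEMMAS AND PROOFS =====

-- proof-only abbreviations
def pvLen (s : ((Int × Int) × (Int × Int)) × ((Int × Int) × (Int × Int))) : Int :=
  s.1.2.1 - s.1.1.1 + s.1.2.2 - s.1.1.2

def pvManhAt (segs : List (((Int × Int) × (Int × Int)) × ((Int × Int) × (Int × Int)))) (point : Int × Int) (k : Nat) : Int :=
  let seg := (segs.getD k default).1
  let prev := pvPrevOf segs k
  let entry := if seg.1 == prev.1 || seg.1 == prev.2 then seg.1 else seg.2
  |point.1 - entry.1| + |point.2 - entry.2|

lemma bFindIdx_ge (point : Int × Int) :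
    ∀ (l : List (((Int × Int) × (Int × Int)) × ((Int × Int) × (Int × Int)))) (i k : Nat),
      bFindIdx point l i = some k → i ≤ k := by
  intro l
  induction l with
  | nil => intro i k h; simp [bFindIdx] at h
  | cons x rest ih =>
    intro i k h
    obtain ⟨seg, other⟩ := x
    rw [bFindIdx] at h
    split_ifs at h with hc
    · simp only [Option.some.injEq] at h; omega
    · have := ih (i+1) k h; omega

-- one step of A's loop, phrased with pvHit
lemma distA_step (segs : List (((Int × Int) × (Int × Int)) × ((Int × Int) × (Int × Int))))
    (point : Int × Int) (i : Nat) (dist : Int) (hi : i < segs.length) :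
    distA_go segs point i dist =
      if pvHit point ((segs.getD i default).1) then
        dist + pvLen (segs.getD i default) - additional_steps (pvPrevOf segs i) ((segs.getD i default).1) point
      else distA_go segs point (i+1) (dist + pvLen (segs.getD i default)) := by
  have hprev : (if i == 0 then (((0:Int),(0:Int)),((0:Int),(0:Int))) else (segs.getD (i-1) default).1)
      = pvPrevOf segs i := by
    unfold pvPrevOf; by_cases h0 : i = 0 <;> simp [h0]
  by_cases hit : pvHit point ((segs.getD i default).1) = true
  · rw [if_pos hit]
    revert hit
    unfold pvHit
    by_cases c1 : (point.1 == (segs.getD i default).1.1.1 && point.1 == (segs.getD i default).1.2.1) = true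
    · intro hit
      rw [if_pos c1] at hit
      have hb : (segs.getD i default).1.1.2 ≤ point.2 ∧ point.2 ≤ (segs.getD i default).1.2.2 :=
        of_decide_eq_true hit
      rw [distA_go, dif_pos hi]
      simp only [hprev]
      rw [if_pos c1, if_pos hb]
      simp [pvLen]
    · intro hit
      rw [if_neg c1] at hit
      simp only [Bool.and_eq_true, decide_eq_true_eq, beq_iff_eq] at hit
      obtain ⟨⟨h2a, h2b⟩, hb⟩ := hit
      rw [distA_go, dif_pos hi]
      simp only [hprev]
      rw [if_neg c1,
        if_pos (show ((point.2 == (segs.getD i default).1.1.2 && point.2 == (segs.getD i default).1.2.2) = true) by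
          rw [Bool.and_eq_true]; exact ⟨beq_iff_eq.mpr h2a, beq_iff_eq.mpr h2b⟩),
        if_pos hb]
      simp [pvLen]
  · rw [if_neg hit]
    have hit' : pvHit point ((segs.getD i default).1) = false := by
      cases h : pvHit point ((segs.getD i default).1) with
      | false => rfl
      | true => exact absurd h hit
    revert hit'
    unfold pvHit
    rw [distA_go, dif_pos hi]
    simp only [hprev]
    by_cases c1 : (point.1 == (segs.getD i default).1.1.1 && point.1 == (segs.getD i default).1.2.1) = true
    · intro hit'
      rw [if_pos c1] at hit'
      have hb : ¬ ((segs.getD i default).1.1.2 ≤ point.2 ∧ point.2 ≤ (segs.getD i default).1.2.2) := by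
        intro hb
        rw [decide_eq_true hb] at hit'
        exact absurd hit' (by decide)
      rw [if_pos c1, if_neg hb]
      simp [pvLen]
    · intro hit'
      rw [if_neg c1] at hit'
      rw [if_neg c1]
      by_cases c2 : (point.2 == (segs.getD i default).1.1.2 && point.2 == (segs.getD i default).1.2.2) = true
      · have c2' := c2
        simp only [Bool.and_eq_true, beq_iff_eq] at c2'
        have hb : ¬ ((segs.getD i default).1.1.1 ≤ point.1 ∧ point.1 ≤ (segs.getD i default).1.2.1) := by
          intro hb
          rw [show (point.2 == (segs.getD i default).1.1.2) = true from beq_iff_eq.mpr c2'.1,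
            show (point.2 == (segs.getD i default).1.2.2) = true from beq_iff_eq.mpr c2'.2,
            decide_eq_true hb] at hit'
          simp at hit'
        rw [if_pos c2, if_neg hb]
        simp [pvLen]
      · rw [if_neg c2]
        simp [pvLen]

lemma bFindIdx_cons (point : Int × Int) (x : ((Int × Int) × (Int × Int)) × ((Int × Int) × (Int × Int)))
    (rest : List (((Int × Int) × (Int × Int)) × ((Int × Int) × (Int × Int)))) (i : Nat) :
    bFindIdx point (x :: rest) i = if bContains point x.1 then some i else bFindIdx point rest (i+1) := by
  obtain ⟨seg, other⟩ := x; rfl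

-- the value both programs return at the first containing segment agrees
set_option maxHeartbeats 1000000 in
lemma pv_hit_case (prev seg : (Int × Int) × (Int × Int)) (point : Int × Int) (dist : Int)
    (hhit : pvHit point seg = true) (hadj : pvAdj prev seg = true) :
    dist + (seg.2.1 - seg.1.1 + seg.2.2 - seg.1.2) - additional_steps prev seg point
      = dist + |point.1 - (if seg.1 == prev.1 || seg.1 == prev.2 then seg.1 else seg.2).1|
             + |point.2 - (if seg.1 == prev.1 || seg.1 == prev.2 then seg.1 else seg.2).2| := by
  obtain ⟨⟨x0, y0⟩, x1, y1⟩ := seg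
  obtain ⟨⟨p0, q0⟩, p1, q1⟩ := prev
  obtain ⟨px, py⟩ := point
  have hhit' : (px = x0 ∧ px = x1 ∧ y0 ≤ py ∧ py ≤ y1) ∨
      (¬(px = x0 ∧ px = x1) ∧ py = y0 ∧ py = y1 ∧ x0 ≤ px ∧ px ≤ x1) := by
    unfold pvHit at hhit
    split_ifs at hhit with h <;>
      simp only [Bool.and_eq_true, beq_iff_eq, decide_eq_true_eq] at hhit h <;>
      tauto
  clear hhit
  simp only [pvAdj, Bool.or_eq_true, beq_iff_eq, Prod.mk.injEq] at hadj
  unfold additional_steps is_horiz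
  simp only [Prod.mk.injEq, beq_iff_eq, Bool.or_eq_true, bne_iff_ne]
  rcases hhit' with ⟨hva, hvb, hvc, hvd⟩ | ⟨hna, hhb, hhc, hhd, hhe⟩
  · have h2 : |py - y0| = py - y0 := abs_of_nonneg (by omega)
    have h4 : |py - y1| = -(py - y1) := abs_of_nonpos (by omega)
    have h1 : |px - x0| = px - x0 := abs_of_nonneg (by omega)
    have h3 : |px - x1| = -(px - x1) := abs_of_nonpos (by omega)
    split_ifs <;> dsimp only <;> omega
  · have h1 : |px - x0| = px - x0 := abs_of_nonneg (by omega)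
    have h3 : |px - x1| = -(px - x1) := abs_of_nonpos (by omega)
    have h2 : |py - y0| = py - y0 := abs_of_nonneg (by omega)
    have h4 : |py - y1| = -(py - y1) := abs_of_nonpos (by omega)
    split_ifs <;> dsimp only <;> omega

-- A's loop from index i equals: locate, prefix-sum, correct — relative to drop i
lemma pv_go_eq (segs : List (((Int × Int) × (Int × Int)) × ((Int × Int) × (Int × Int)))) (point : Int × Int) :
    ∀ n i dist, segs.length - i = n →
    (∀ k, i ≤ k → k < segs.length →
        (∀ j, i ≤ j → j < k → pvHit point ((segs.getD j default).1) = false) →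
        pvHit point ((segs.getD k default).1) = true →
        pvAdj (pvPrevOf segs k) ((segs.getD k default).1) = true) →
    distA_go segs point i dist =
      match bFindIdx point (segs.drop i) i with
      | none => -1
      | some k => dist + (((segs.drop i).take (k - i)).map pvLen).sum + pvManhAt segs point k := by
  intro n
  induction n with
  | zero =>
    intro i dist hn _
    have hi : segs.length ≤ i := by omega
    rw [distA_go, List.drop_eq_nil_of_le hi]
    simp [bFindIdx, hi]
  | succ m ih =>
    intro i dist hn hpre
    have hi : i < segs.length := by omega
    have hdrop : segs.drop i = segs[i] :: segs.drop (i+1) := List.drop_eq_getElem_cons hi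
    have hgetD : segs.getD i default = segs[i] := List.getD_eq_getElem segs default hi
    rw [distA_step segs point i dist hi, hdrop, bFindIdx_cons]
    rw [show bContains point segs[i].1 = pvHit point ((segs.getD i default).1) by rw [hgetD]; rfl]
    by_cases hit : pvHit point ((segs.getD i default).1) = true
    · rw [if_pos hit, if_pos hit]
      have hadj : pvAdj (pvPrevOf segs i) ((segs.getD i default).1) = true :=
        hpre i le_rfl hi (fun j h1 h2 => absurd h1 (by omega)) hit
      have hval := pv_hit_case (pvPrevOf segs i) ((segs.getD i default).1) point dist hit hadj
      simp only [Nat.sub_self, List.take_zero, List.map_nil, List.sum_nil, pvManhAt, pvLen] at *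
      rw [hval]; ring
    · have hit' : pvHit point ((segs.getD i default).1) = false := by
        cases h : pvHit point ((segs.getD i default).1) with
        | false => rfl
        | true => exact absurd h hit
      rw [if_neg (by rw [hit']; decide), if_neg (by rw [hit']; decide)]
      have hpre' : ∀ k, i+1 ≤ k → k < segs.length →
          (∀ j, i+1 ≤ j → j < k → pvHit point ((segs.getD j default).1) = false) →
          pvHit point ((segs.getD k default).1) = true →
          pvAdj (pvPrevOf segs k) ((segs.getD k default).1) = true := by
        intro k hk1 hk2 hnone hh
        refine hpre k (by omega) hk2 (fun j hj1 hj2 => ?_) hh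
        by_cases hji : j = i
        · rw [hji]; exact hit'
        · exact hnone j (by omega) hj2
      have hIH := ih (i+1) (dist + pvLen (segs.getD i default)) (by omega) hpre'
      rw [hIH]
      cases hfind : bFindIdx point (segs.drop (i+1)) (i+1) with
      | none => rfl
      | some k =>
        have hk : i + 1 ≤ k := bFindIdx_ge point _ _ _ hfind
        dsimp only
        rw [show k - i = (k - (i+1)) + 1 by omega, List.take_succ_cons, List.map_cons,
          List.sum_cons, ← hgetD]
        ring

-- ===== VERDICT (by name: the statement is the Claim_ definition above) =====
theorem dist_to_point_spec : Claim_equal_dist_to_point := by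
  intro segs point _ hpre
  unfold Spec_dist_to_point dist_to_point dist_to_point_alt
  have h := pv_go_eq segs point segs.length 0 0 (by omega)
    (fun k _ hk2 hnone hhit => hpre k hk2 (fun j hj => hnone j (Nat.zero_le j) hj) hhit)
  rw [h]
  cases hfind : bFindIdx point segs 0 with
  | none => simp [hfind]
  | some k =>
    simp only [List.drop_zero] at h ⊢
    rw [hfind]
    have hprev : (if k == 0 then (((0:Int),(0:Int)),((0:Int),(0:Int))) else (segs.getD (k-1) default).1)
        = pvPrevOf segs k := by
      unfold pvPrevOf; by_cases h0 : k = 0 <;> simp [h0]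
    simp only [pvManhAt, hprev, Nat.sub_zero]
    rw [show (fun s : ((Int × Int) × (Int × Int)) × ((Int × Int) × (Int × Int)) => s.1.2.1 - s.1.1.1 + s.1.2.2 - s.1.1.2) = pvLen from rfl]
    ring
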